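-- pv_equiv track=rewrite | github.com/angelinadegay/pdf_pipeline | text_extraction.py | parse_gpt_output
-- ===== SOURCE A (Python) =====
-- from collections import defaultdict
--
-- def parse_gpt_output(raw_output):
--     parsed = defaultdict(list)
--     lines = raw_output.splitlines()
--     current_theme = None
--     for line in lines:
--         line = line.strip()
--         if line.startswith("**") and line.endswith(":**"):  # Theme header
--             current_theme = line.strip("**:").strip()
--         elif line.startswith("-") and current_theme:
--             if "No specific information found" not in line:# Quotation under the theme
--                 parsed[current_theme].append(line.lstrip("- ").strip())
--     return parsed
-- ===== SOURCE B (Python) =====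
-- from collections import defaultdict
--
-- def parse_gpt_output(raw_output):
--     # Phase 1: group the stripped lines into themed sections (header name, body lines).
--     sections = []
--     current = None  # the open section: (theme name, body lines)
--     for line in raw_output.splitlines():
--         line = line.strip()
--         if line.startswith("**") and line.endswith(":**"):
--             if current is not None:
--                 sections.append(current)
--             current = (line.strip("**:").strip(), [])
--         elif current is not None:
--             current[1].append(line)
--     if current is not None:
--         sections.append(current)
--     # Phase 2: collect the bullet quotes of each named section.
--     parsed = defaultdict(list)
--     for theme, body in sections:
--         if not theme:
--             continue
--         for line in body:
--             if line.startswith("-") and "No specific information found" not in line: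
--                 parsed[theme].append(line.lstrip("- ").strip())
--     return parsed
-- ===== Notes on version B (the rewrite author's own statement) =====
-- stated objective: alternative
-- what changed: Replaces A's single stateful pass (mutating a current-theme register while filling the dict) by a two-phase decomposition: first group the stripped lines into themed sections, then collect each named section's bullet quotes into the dict.
import Mathlib
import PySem

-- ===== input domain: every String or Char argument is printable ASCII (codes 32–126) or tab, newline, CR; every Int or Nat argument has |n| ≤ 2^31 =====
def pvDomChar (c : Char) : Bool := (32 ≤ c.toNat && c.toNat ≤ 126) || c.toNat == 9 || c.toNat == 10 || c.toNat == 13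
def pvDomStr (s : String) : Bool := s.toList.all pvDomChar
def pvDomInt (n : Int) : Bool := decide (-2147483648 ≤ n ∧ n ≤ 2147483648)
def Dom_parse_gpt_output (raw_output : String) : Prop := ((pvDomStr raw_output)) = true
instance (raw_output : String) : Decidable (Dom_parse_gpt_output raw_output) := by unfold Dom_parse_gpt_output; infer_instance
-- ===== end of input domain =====

-- B replaces A's single stateful pass by a two-phase decomposition (group lines into
-- themed sections, then collect each section's bullet quotes); objective: alternative.

-- s.lstrip(chars): drop leading characters belonging to the set `chars` (exact for Python lstrip with an argument)
def pvLstripChars (s : String) (chars : String) : String :=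
  String.ofList (s.toList.dropWhile (fun c => c ∈ chars.toList))

-- ===== PORT A =====
-- one loop step of A: state = (parsed dict, current_theme)
def pvStepA (st : PySem.Dict String (List String) × Option String) (line : String) :
    PySem.Dict String (List String) × Option String :=
  let l := PySem.Str.strip line
  if PySem.Str.startswith l "**" && PySem.Str.endswith l ":**" then
    (st.1, some (PySem.Str.strip (PySem.Str.stripChars l "**:")))
  else
    match st.2 with
    | some t =>
        if PySem.Str.startswith l "-" && !(t == "") then
          if !(PySem.Str.isIn "No specific information found" l) then
            (st.1.modify t [] (fun qs => qs ++ [PySem.Str.strip (pvLstripChars l "- ")]), st.2)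
          else st
        else st
    | none => st

def parse_gpt_output (raw_output : String) : List (String × List String) :=
  ((PySem.Str.splitlines raw_output).foldl pvStepA (PySem.Dict.empty, none)).1.items

-- ===== PORT B =====
-- phase-1 step: group stripped lines into sections; state = (closed sections, open section)
def pvStep1 (st : List (String × List String) × Option (String × List String)) (line : String) :
    List (String × List String) × Option (String × List String) :=
  let l := PySem.Str.strip line
  if PySem.Str.startswith l "**" && PySem.Str.endswith l ":**" then
    (st.1 ++ st.2.toList, some (PySem.Str.strip (PySem.Str.stripChars l "**:"), []))
  else
    match st.2 with
    | some sec => (st.1, some (sec.1, sec.2 ++ [l]))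
    | none => st

def pvSections (raw : String) : List (String × List String) :=
  let st := (PySem.Str.splitlines raw).foldl pvStep1 ([], none)
  st.1 ++ st.2.toList

-- phase-2: fold one section's bullet quotes into the dict (empty theme names are falsy and skipped)
def pvAddSection (d : PySem.Dict String (List String)) (sec : String × List String) :
    PySem.Dict String (List String) :=
  if sec.1 == "" then d
  else
    sec.2.foldl (fun d l =>
      if PySem.Str.startswith l "-" && !(PySem.Str.isIn "No specific information found" l) then
        d.modify sec.1 [] (fun qs => qs ++ [PySem.Str.strip (pvLstripChars l "- ")])
      else d) d

def parse_gpt_output_alt (raw_output : String) : List (String × List String) :=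
  ((pvSections raw_output).foldl pvAddSection PySem.Dict.empty).items

-- ===== PRECONDITION & SPEC =====
def Spec_parse_gpt_output (raw_output : String) (out : List (String × List String)) : Prop := out = parse_gpt_output_alt raw_output
instance (raw_output : String) (out : List (String × List String)) : Decidable (Spec_parse_gpt_output raw_output out) := by unfold Spec_parse_gpt_output; infer_instance

-- ===== CLAIM (what is proved, stated in full; the proofs are below) =====
def Claim_equal_parse_gpt_output : Prop := ∀ (raw_output : String), Dom_parse_gpt_output raw_output → Spec_parse_gpt_output raw_output (parse_gpt_output raw_output)

-- ===== LEMMAS AND PROOFS =====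

-- an empty-bodied section contributes nothing
lemma pvAddSection_nil (d : PySem.Dict String (List String)) (t : String) :
    pvAddSection d (t, []) = d := by
  unfold pvAddSection; split <;> simp

-- the invariant: A's state after any lines equals phase 2 applied to B's phase-1 state
lemma pv_main (lines : List String) (secs : List (String × List String))
    (op : Option (String × List String)) :
    lines.foldl pvStepA ((secs ++ op.toList).foldl pvAddSection PySem.Dict.empty, op.map (·.1))
      = (((lines.foldl pvStep1 (secs, op)).1 ++ (lines.foldl pvStep1 (secs, op)).2.toList).foldl
           pvAddSection PySem.Dict.empty,
         (lines.foldl pvStep1 (secs, op)).2.map (·.1)) := by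
  induction lines generalizing secs op with
  | nil => simp
  | cons line rest ih =>
    simp only [List.foldl_cons]
    by_cases hh : (PySem.Str.startswith (PySem.Str.strip line) "**"
        && PySem.Str.endswith (PySem.Str.strip line) ":**") = true
    · -- header line: close the open section; the fresh empty section contributes nothing yet
      have hA : pvStepA ((secs ++ op.toList).foldl pvAddSection PySem.Dict.empty, op.map (·.1)) line
          = ((secs ++ op.toList).foldl pvAddSection PySem.Dict.empty,
             some (PySem.Str.strip (PySem.Str.stripChars (PySem.Str.strip line) "**:"))) := by
        unfold pvStepA; rw [if_pos hh]
      have hB : pvStep1 (secs, op) line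
          = (secs ++ op.toList,
             some (PySem.Str.strip (PySem.Str.stripChars (PySem.Str.strip line) "**:"), [])) := by
        unfold pvStep1; rw [if_pos hh]
      rw [hA, hB]
      have heq : (secs ++ op.toList).foldl pvAddSection PySem.Dict.empty
          = ((secs ++ op.toList)
              ++ (some (PySem.Str.strip (PySem.Str.stripChars (PySem.Str.strip line) "**:"), ([] : List String))).toList).foldl
              pvAddSection PySem.Dict.empty := by
        simp [List.foldl_append, pvAddSection_nil]
      rw [heq]
      exact ih (secs ++ op.toList)
        (some (PySem.Str.strip (PySem.Str.stripChars (PySem.Str.strip line) "**:"), []))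
    · -- non-header line
      cases op with
      | none =>
        have hA : pvStepA ((secs ++ (none : Option (String × List String)).toList).foldl
              pvAddSection PySem.Dict.empty, Option.map (·.1) (none : Option (String × List String))) line
            = ((secs ++ (none : Option (String × List String)).toList).foldl pvAddSection
                PySem.Dict.empty, Option.map (·.1) (none : Option (String × List String))) := by
          unfold pvStepA; rw [if_neg hh]; rfl
        have hB : pvStep1 (secs, (none : Option (String × List String))) line = (secs, none) := by
          unfold pvStep1; rw [if_neg hh]
        rw [hA, hB]; exact ih secs none
      | some sec =>
        obtain ⟨t, body⟩ := sec
        have hB : pvStep1 (secs, some (t, body)) line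
            = (secs, some (t, body ++ [PySem.Str.strip line])) := by
          unfold pvStep1; rw [if_neg hh]
        have hstep : pvStepA ((secs ++ (some (t, body)).toList).foldl pvAddSection PySem.Dict.empty,
              Option.map (·.1) (some (t, body))) line
            = ((secs ++ (some (t, body ++ [PySem.Str.strip line])).toList).foldl pvAddSection
                PySem.Dict.empty, Option.map (·.1) (some (t, body ++ [PySem.Str.strip line]))) := by
          simp only [Option.toList_some, Option.map_some, List.foldl_append, List.foldl_cons,
            List.foldl_nil]
          unfold pvStepA
          rw [if_neg hh]
          dsimp only
          by_cases ht : (t == "") = true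
          · -- falsy theme: A skips the bullet, B's phase 2 skips the whole section
            simp [pvAddSection, ht]
          · simp only [pvAddSection, if_neg ht, List.foldl_append, List.foldl_cons, List.foldl_nil]
            by_cases hs : PySem.Str.startswith (PySem.Str.strip line) "-" = true
            · simp only [hs, ht, Bool.not_false, Bool.and_true, Bool.true_and, if_true]
              by_cases hn :
                  PySem.Str.isIn "No specific information found" (PySem.Str.strip line) = true
              · simp only [hn, Bool.not_true, Bool.false_eq_true, if_false]
              · simp only [Bool.not_eq_true] at hn
                simp only [hn, Bool.not_false, if_true]
            · simp only [Bool.not_eq_true] at hs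
              simp only [hs, Bool.false_and, Bool.false_eq_true, if_false]
        rw [hstep, hB]
        exact ih secs (some (t, body ++ [PySem.Str.strip line]))

-- ===== VERDICT (by name: the statement is the Claim_ definition above) =====
theorem parse_gpt_output_spec : Claim_equal_parse_gpt_output := by
  intro raw _
  unfold Spec_parse_gpt_output parse_gpt_output parse_gpt_output_alt pvSections
  have := pv_main (PySem.Str.splitlines raw) [] none
  simp only [Option.toList_none, List.append_nil, List.foldl_nil,
    Option.map_none] at this
  rw [this]
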